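-- pv_equiv track=rewrite | github.com/kevingeo11/Genetic-Algorithm-Python | PyGA.py | fitness_saturation
-- ===== SOURCE A (Python) =====
-- def fitness_saturation(max_fitness, number_of_similarity):
-- 	result = False
-- 	similarity = 0
-- 	if len(max_fitness) > number_of_similarity:
-- 		for i in range(1,number_of_similarity):
-- 			if max_fitness[len(max_fitness) - i] == max_fitness[len(max_fitness) - i - 1]:
-- 				similarity += 1
-- 			else:
-- 				similarity = 0
-- 		if similarity == number_of_similarity-1:
-- 			result = True
-- 		return result
-- 	else:
-- 		return result
-- ===== SOURCE B (Python) =====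
-- def fitness_saturation(max_fitness, number_of_similarity):
--     if number_of_similarity < 1 or len(max_fitness) <= number_of_similarity:
--         return False
--     return len(set(max_fitness[-number_of_similarity:])) == 1
-- ===== Notes on version B (the rewrite author's own statement) =====
-- stated objective: alternative
-- what changed: Replaces A's incrementing/resetting streak counter over end-anchored adjacent index pairs with building a set from the tail slice and testing that it has exactly one distinct element.
import Mathlib
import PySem

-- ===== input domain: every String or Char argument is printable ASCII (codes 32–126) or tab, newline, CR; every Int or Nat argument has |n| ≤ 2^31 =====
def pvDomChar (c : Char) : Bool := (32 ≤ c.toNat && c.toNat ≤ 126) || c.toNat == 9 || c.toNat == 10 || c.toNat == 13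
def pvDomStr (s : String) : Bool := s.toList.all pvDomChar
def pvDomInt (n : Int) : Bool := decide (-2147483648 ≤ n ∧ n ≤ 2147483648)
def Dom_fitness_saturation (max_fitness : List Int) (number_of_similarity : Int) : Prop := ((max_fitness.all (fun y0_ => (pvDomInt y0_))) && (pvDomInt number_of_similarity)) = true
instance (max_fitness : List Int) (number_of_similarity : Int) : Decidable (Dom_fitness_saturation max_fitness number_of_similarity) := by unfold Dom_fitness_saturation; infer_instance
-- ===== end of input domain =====

-- B replaces A's incrementing/resetting streak counter over end-anchored adjacent pairs by
-- building a SET from the tail slice and testing it has exactly one distinct element (objective: alternative).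

-- ===== PORT A =====
def fitness_saturation (max_fitness : List Int) (number_of_similarity : Int) : Bool :=
  let result := false
  let similarity : Int := 0
  if (max_fitness.length : Int) > number_of_similarity then
    let similarity := (PySem.List.pyRange 1 number_of_similarity 1).foldl
      (fun similarity i =>
        if PySem.List.pyGetD max_fitness ((max_fitness.length : Int) - i) 0 ==
           PySem.List.pyGetD max_fitness ((max_fitness.length : Int) - i - 1) 0
        then similarity + 1 else 0) similarity
    let result := if similarity == number_of_similarity - 1 then true else result
    result
  else
    result

-- ===== PORT B =====
def fitness_saturation_alt (max_fitness : List Int) (number_of_similarity : Int) : Bool :=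
  if number_of_similarity < 1 || (max_fitness.length : Int) ≤ number_of_similarity then
    false
  else
    ((PySem.Set.ofList (PySem.List.slice max_fitness (some (-number_of_similarity)) none)).length : Int) == 1

-- ===== PRECONDITION & SPEC =====
def Spec_fitness_saturation (max_fitness : List Int) (number_of_similarity : Int) (out : Bool) : Prop := out = fitness_saturation_alt max_fitness number_of_similarity
instance (max_fitness : List Int) (number_of_similarity : Int) (out : Bool) : Decidable (Spec_fitness_saturation max_fitness number_of_similarity out) := by unfold Spec_fitness_saturation; infer_instance

-- ===== CLAIM (what is proved, stated in full; the proofs are below) =====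
def Claim_equal_fitness_saturation : Prop := ∀ (max_fitness : List Int) (number_of_similarity : Int), Dom_fitness_saturation max_fitness number_of_similarity → Spec_fitness_saturation max_fitness number_of_similarity (fitness_saturation max_fitness number_of_similarity)

-- ===== LEMMAS AND PROOFS =====

-- A's increment-or-reset streak counter hits s + |l| exactly when every comparison succeeds.
lemma streak_foldl (P : Int → Bool) :
    ∀ (l : List Int) (s : Int), 0 ≤ s →
      l.foldl (fun acc i => if P i then acc + 1 else 0) s ≤ s + l.length ∧
      (l.foldl (fun acc i => if P i then acc + 1 else 0) s = s + l.length ↔ ∀ i ∈ l, P i = true) := by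
  intro l
  induction l with
  | nil => intro s hs; simp
  | cons x t ih =>
    intro s hs
    by_cases hx : P x = true
    · have h := ih (s + 1) (by omega)
      simp [List.foldl_cons, hx]
      constructor
      · have := h.1; push_cast at this ⊢; omega
      · have := h.2
        constructor
        · intro he
          have : t.foldl (fun acc i => if P i then acc + 1 else 0) (s + 1) = (s + 1) + t.length := by
            push_cast at he ⊢; omega
          exact (h.2.mp this)
        · intro ha
          have : t.foldl (fun acc i => if P i then acc + 1 else 0) (s + 1) = (s + 1) + t.length :=
            h.2.mpr ha
          push_cast at this ⊢; omega
    · have h := ih 0 (le_refl 0)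
      simp [List.foldl_cons, hx]
      constructor
      · have := h.1; push_cast at this ⊢; omega
      · intro he
        exfalso
        have := h.1
        push_cast at he this; omega

-- "everything equals the head" is the same as "every adjacent pair is equal" (front-indexed).
lemma allhead_iff_chain (a : Int) (t : List Int) :
    ((a :: t).all (fun v => v == a)) = true ↔
      ∀ j : Nat, j + 1 < (a :: t).length → (a :: t).getD (j + 1) 0 = (a :: t).getD j 0 := by
  induction t generalizing a with
  | nil => simp
  | cons b t ih =>
    constructor
    · intro h j hj
      simp only [List.all_cons, Bool.and_eq_true, beq_iff_eq] at h
      have hba' : b = a := h.2.1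
      subst hba'
      cases j with
      | zero => simp
      | succ j =>
        have := (ih b).mp (by simp only [List.all_cons, beq_self_eq_true, Bool.true_and]; exact h.2.2)
        have hj' : j + 1 < (b :: t).length := by simpa using hj
        simpa using this j hj'
    · intro h
      have hba : b = a := by
        have := h 0 (by simp)
        simpa using this
      subst hba
      have ht : ((b :: t).all (fun v => v == b)) = true := by
        apply (ih b).mpr
        intro j hj
        have := h (j + 1) (by simpa using Nat.succ_lt_succ hj)
        simpa using this
      simp only [List.all_cons, beq_self_eq_true, Bool.true_and]
      simpa using ht

-- adding an element already present leaves the set unchanged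
lemma set_add_self (s : PySem.Set Int) (x : Int) (hx : x ∈ s) : PySem.Set.add s x = s := by
  simp [PySem.Set.add, PySem.Set.contains, hx]

-- the distinct-element set of a nonempty list is a singleton iff every element equals the head
lemma setlen_one (a : Int) (t : List Int) :
    ((PySem.Set.ofList (a :: t)).length = 1) ↔ ((a :: t).all (fun v => v == a)) = true := by
  constructor
  · intro h
    cases hs : PySem.Set.ofList (a :: t) with
    | nil => rw [hs] at h; simp at h
    | cons x r =>
      rw [hs] at h
      have hr : r = [] := by simpa using h
      subst hr
      have hax : a = x := by
        have : a ∈ PySem.Set.ofList (a :: t) := (PySem.Set.mem_ofList _ _).mpr (by simp)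
        rw [hs] at this; simpa using this
      subst hax
      rw [List.all_eq_true]
      intro v hv
      have : v ∈ PySem.Set.ofList (a :: t) := (PySem.Set.mem_ofList _ _).mpr hv
      rw [hs] at this
      simpa using this
  · intro h
    rw [List.all_eq_true] at h
    have key : ∀ (u : List Int), (∀ v ∈ u, v = a) → u.foldl PySem.Set.add [a] = [a] := by
      intro u
      induction u with
      | nil => intro _; rfl
      | cons b u ih =>
        intro hu
        have hb : b = a := hu b (by simp)
        subst hb
        rw [List.foldl_cons, set_add_self [b] b (by simp)]
        exact ih (fun v hv => hu v (by simp [hv]))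
    have h1 : PySem.Set.ofList (a :: t) = [a] := by
      rw [PySem.Set.ofList_eq_foldl, List.foldl_cons]
      have : PySem.Set.add [] a = [a] := rfl
      rw [this]
      exact key t (fun v hv => by have := h v (by simp [hv]); simpa using this)
    rw [h1]
    rfl

-- ===== VERDICT (by name: the statement is the Claim_ definition above) =====
theorem fitness_saturation_spec : Claim_equal_fitness_saturation := by
  intro mf ns _
  unfold Spec_fitness_saturation fitness_saturation fitness_saturation_alt
  dsimp only
  by_cases h2 : (mf.length : Int) ≤ ns
  · simp [not_lt.mpr h2, h2]
  · rw [not_le] at h2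
    by_cases h1 : ns < 1
    · have hneq : ¬ ((0 : Int) = ns - 1) := by omega
      simp [h2, h1, PySem.List.pyRange_one_eq_nil (by omega : ns ≤ (1:Int)), hneq]
    · rw [not_lt] at h1
      obtain ⟨k, rfl⟩ : ∃ k : Nat, ns = (k : Int) := ⟨ns.toNat, by omega⟩
      have hk1 : 1 ≤ k := by exact_mod_cast h1
      have hkn : k < mf.length := by exact_mod_cast h2
      have hguard : (decide ((k:Int) < 1) || decide ((mf.length:Int) ≤ (k:Int))) = false := by
        simp; omega
      rw [hguard]
      simp only [Bool.false_eq_true, if_false]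
      rw [PySem.List.slice_from_neg_natCast mf k (by omega)]
      have hdlen : (mf.drop (mf.length - k)).length = k := by
        simp [List.length_drop]; omega
      cases hdc : mf.drop (mf.length - k) with
      | nil => rw [hdc] at hdlen; simp at hdlen; omega
      | cons a t =>
        rw [hdc] at hdlen
        rw [if_pos (by exact_mod_cast hkn : (mf.length : Int) > (k : Int))]
        have hget : ∀ j : Nat, (a :: t).getD j 0 = mf.getD (mf.length - k + j) 0 := by
          intro j
          rw [← hdc]
          simp [List.getD_eq_getElem?_getD, List.getElem?_drop]
        have hpg : ∀ (m : Int), 0 ≤ m → m < (mf.length : Int) →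
            PySem.List.pyGetD mf m 0 = mf.getD m.toNat 0 := by
          intro m h0 hm
          rw [PySem.List.pyGetD_eq_getElem mf 0 h0 hm, List.getD_eq_getElem]
        -- the streak characterisation of A's loop
        have hstreak := (streak_foldl
          (fun i => PySem.List.pyGetD mf ((mf.length : Int) - i) 0 ==
                    PySem.List.pyGetD mf ((mf.length : Int) - i - 1) 0)
          (PySem.List.pyRange 1 (k : Int) 1) 0 (le_refl 0)).2
        have hlenr : ((PySem.List.pyRange 1 (k : Int) 1).length : Int) = (k : Int) - 1 := by
          rw [PySem.List.length_pyRange_one]; omega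
        rw [hlenr] at hstreak
        simp only [zero_add] at hstreak
        -- bridge between A's end-anchored pairs and the front-indexed chain on the tail
        have hbridge :
            (∀ i ∈ PySem.List.pyRange 1 (k : Int) 1,
              (PySem.List.pyGetD mf ((mf.length : Int) - i) 0 ==
               PySem.List.pyGetD mf ((mf.length : Int) - i - 1) 0) = true) ↔
            (∀ j : Nat, j + 1 < (a :: t).length →
              (a :: t).getD (j + 1) 0 = (a :: t).getD j 0) := by
          constructor
          · intro h j hj
            rw [hdlen] at hj
            have hi := h ((k - j - 1 : Nat) : Int)
              (PySem.List.mem_pyRange_one.mpr ⟨by omega, by omega⟩)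
            rw [hpg _ (by omega) (by omega), hpg _ (by omega) (by omega), beq_iff_eq] at hi
            have e1 : ((mf.length : Int) - ((k - j - 1 : Nat) : Int)).toNat
                = mf.length - k + (j + 1) := by omega
            have e2 : ((mf.length : Int) - ((k - j - 1 : Nat) : Int) - 1).toNat
                = mf.length - k + j := by omega
            rw [e1, e2] at hi
            rw [hget, hget]
            exact hi
          · intro h i hi
            obtain ⟨hi1, hi2⟩ := PySem.List.mem_pyRange_one.mp hi
            have hj := h (k - i.toNat - 1) (by rw [hdlen]; omega)
            rw [hget, hget] at hj
            rw [hpg _ (by omega) (by omega), hpg _ (by omega) (by omega), beq_iff_eq]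
            have e1 : ((mf.length : Int) - i).toNat = mf.length - k + (k - i.toNat - 1 + 1) := by
              omega
            have e2 : ((mf.length : Int) - i - 1).toNat = mf.length - k + (k - i.toNat - 1) := by
              omega
            rw [e1, e2]
            exact hj
        have hBchar : (((PySem.Set.ofList (a :: t)).length : Int) == 1) =
            ((a :: t).all (fun v => v == a)) := by
          by_cases hall : ((a :: t).all (fun v => v == a)) = true
          · rw [hall]
            have := (setlen_one a t).mpr hall
            simp [this]
          · rw [Bool.eq_false_iff.mpr hall]
            refine Bool.eq_false_iff.mpr ?_
            intro hc
            exact hall ((setlen_one a t).mp (by exact_mod_cast beq_iff_eq.mp hc))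
        rw [hBchar]
        by_cases hc : (PySem.List.pyRange 1 (k : Int) 1).foldl
            (fun similarity i =>
              if PySem.List.pyGetD mf ((mf.length : Int) - i) 0 ==
                 PySem.List.pyGetD mf ((mf.length : Int) - i - 1) 0
              then similarity + 1 else 0) 0 = (k : Int) - 1
        · rw [if_pos (beq_iff_eq.mpr hc)]
          exact ((allhead_iff_chain a t).mpr (hbridge.mp (hstreak.mp hc))).symm
        · rw [if_neg (by simpa using hc)]
          refine (Bool.eq_false_iff.mpr ?_).symm
          intro hall
          exact hc (hstreak.mpr (hbridge.mpr ((allhead_iff_chain a t).mp hall)))
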